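-- pv_equiv track=rewrite | github.com/ZecaCosta/restaurant-orders | src/analyze_log.py | dias_sem_ir
-- ===== SOURCE A (Python) =====
-- def dias_sem_ir(nome_do_cliente, lista_de_pedido):
--     todos_os_dias = {pedido["dia_da_semana"] for pedido in lista_de_pedido}
--     dias_frequentados = {
--         pedido["dia_da_semana"]
--         for pedido in lista_de_pedido
--         if pedido["nome_do_cliente"] == nome_do_cliente
--     }
--     dias_sem_ir = todos_os_dias.symmetric_difference(dias_frequentados)
--     return dias_sem_ir
-- ===== SOURCE B (Python) =====
-- def dias_sem_ir(nome_do_cliente, lista_de_pedido):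
--     day_to_clients = {}
--     for pedido in lista_de_pedido:
--         day_to_clients.setdefault(pedido["dia_da_semana"], set()).add(pedido["nome_do_cliente"])
--     return {
--         dia
--         for dia, clientes in day_to_clients.items()
--         if nome_do_cliente not in clientes
--     }
-- ===== Notes on version B (the rewrite author's own statement) =====
-- stated objective: alternative
-- what changed: B replaces A's two flat day-sets and their symmetric difference by a single grouped index (one pass building a dict day -> set of clients) followed by a filtering comprehension over that index.
-- outside the precondition, e.g. on dias_sem_ir('ana', [{'dia_da_semana': 'seg'}]): A raises KeyError, B raises KeyError
import Mathlib
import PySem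

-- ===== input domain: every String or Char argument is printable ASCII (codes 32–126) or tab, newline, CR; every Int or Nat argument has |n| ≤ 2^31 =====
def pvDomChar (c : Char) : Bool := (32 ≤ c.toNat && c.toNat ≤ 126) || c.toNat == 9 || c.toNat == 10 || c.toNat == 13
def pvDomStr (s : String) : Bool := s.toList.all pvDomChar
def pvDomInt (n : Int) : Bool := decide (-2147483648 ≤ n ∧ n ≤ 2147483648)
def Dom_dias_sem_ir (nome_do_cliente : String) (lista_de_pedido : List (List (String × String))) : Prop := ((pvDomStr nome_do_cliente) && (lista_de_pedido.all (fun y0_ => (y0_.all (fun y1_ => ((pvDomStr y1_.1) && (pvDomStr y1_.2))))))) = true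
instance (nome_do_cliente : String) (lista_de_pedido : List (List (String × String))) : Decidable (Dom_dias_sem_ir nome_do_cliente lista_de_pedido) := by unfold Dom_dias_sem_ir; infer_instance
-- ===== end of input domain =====

-- B groups the orders into a dict day -> set of clients in one pass and filters that
-- index, instead of A's two flat day-sets combined by symmetric_difference (objective: alternative).

-- ===== PORT A =====
-- pedido["k"]: first-match association-list lookup; exact on Pre_ (the key is present in every pedido)
def pedidoGet (p : List (String × String)) (k : String) : String :=
  (PySem.Dict.mk p).getD k ""

-- todos_os_dias, dias_frequentados, then their symmetric difference
def dias_sem_ir (nome_do_cliente : String) (lista_de_pedido : List (List (String × String))) : List String :=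
  PySem.Set.symmDiff
    (PySem.Set.ofList (lista_de_pedido.map (fun pedido => pedidoGet pedido "dia_da_semana")))
    (PySem.Set.ofList
      ((lista_de_pedido.filter
          (fun pedido => pedidoGet pedido "nome_do_cliente" == nome_do_cliente)).map
        (fun pedido => pedidoGet pedido "dia_da_semana")))

-- ===== PORT B =====
-- one pass building day_to_clients (setdefault(day, set()).add(client)), then the
-- set comprehension over its items
def dias_sem_ir_alt (nome_do_cliente : String) (lista_de_pedido : List (List (String × String))) : List String :=
  PySem.Set.ofList
    (((lista_de_pedido.foldl
        (fun d pedido =>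
          d.modify (pedidoGet pedido "dia_da_semana") PySem.Set.empty
            (fun s => PySem.Set.add s (pedidoGet pedido "nome_do_cliente")))
        PySem.Dict.empty).items.filter
        (fun kv => !(PySem.Set.contains kv.2 nome_do_cliente))).map
      (fun kv => kv.1))

-- ===== PRECONDITION & SPEC =====
-- Pre_ excludes exactly the inputs where Python raises KeyError: some pedido lacks
-- the key "dia_da_semana" or "nome_do_cliente" (both A and B access both keys).
def Pre_dias_sem_ir (nome_do_cliente : String) (lista_de_pedido : List (List (String × String))) : Prop :=
  (lista_de_pedido.all (fun p =>
    (PySem.Dict.mk p).contains "dia_da_semana" && (PySem.Dict.mk p).contains "nome_do_cliente")) = true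
instance (nome_do_cliente : String) (lista_de_pedido : List (List (String × String))) : Decidable (Pre_dias_sem_ir nome_do_cliente lista_de_pedido) := by unfold Pre_dias_sem_ir; infer_instance

def pvWitness_dias_sem_ir : String × (List (List (String × String))) :=
  ("ana", [[("dia_da_semana", "seg"), ("nome_do_cliente", "bob")],
           [("dia_da_semana", "ter"), ("nome_do_cliente", "ana")]])

def Spec_dias_sem_ir (nome_do_cliente : String) (lista_de_pedido : List (List (String × String))) (out : List String) : Prop := out = dias_sem_ir_alt nome_do_cliente lista_de_pedido
instance (nome_do_cliente : String) (lista_de_pedido : List (List (String × String))) (out : List String) : Decidable (Spec_dias_sem_ir nome_do_cliente lista_de_pedido out) := by unfold Spec_dias_sem_ir; infer_instance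

-- ===== CLAIM (what is proved, stated in full; the proofs are below) =====
def Claim_equal_dias_sem_ir : Prop := ∀ (nome_do_cliente : String) (lista_de_pedido : List (List (String × String))), Dom_dias_sem_ir nome_do_cliente lista_de_pedido → Pre_dias_sem_ir nome_do_cliente lista_de_pedido → Spec_dias_sem_ir nome_do_cliente lista_de_pedido (dias_sem_ir nome_do_cliente lista_de_pedido)

-- ===== LEMMAS AND PROOFS =====

-- the grouped index's entry for day k contains exactly the clients of the orders of day k
lemma group_getD_contains (nome : String) (l : List (List (String × String)))
    (d : PySem.Dict String (PySem.Set String)) (k : String) :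
    (PySem.Set.contains
        ((l.foldl
            (fun d pedido =>
              d.modify (pedidoGet pedido "dia_da_semana") PySem.Set.empty
                (fun s => PySem.Set.add s (pedidoGet pedido "nome_do_cliente")))
            d).getD k PySem.Set.empty) nome = true) ↔
      (PySem.Set.contains (d.getD k PySem.Set.empty) nome = true) ∨
        ∃ p ∈ l, pedidoGet p "dia_da_semana" = k ∧ pedidoGet p "nome_do_cliente" = nome := by
  induction l generalizing d with
  | nil => simp
  | cons p rest ih =>
    rw [List.foldl_cons, ih]
    by_cases hk : k = pedidoGet p "dia_da_semana"
    · rw [PySem.Dict.getD_modify, if_pos hk, hk]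
      simp only [PySem.Set.contains_iff, PySem.Set.mem_add, List.mem_cons]
      constructor
      · rintro ((h | h) | ⟨q, hq, h1, h2⟩)
        · exact Or.inl h
        · exact Or.inr ⟨p, Or.inl rfl, rfl, h.symm⟩
        · exact Or.inr ⟨q, Or.inr hq, h1, h2⟩
      · rintro (h | ⟨q, hq | hq, h1, h2⟩)
        · exact Or.inl (Or.inl h)
        · subst hq; exact Or.inl (Or.inr h2.symm)
        · exact Or.inr ⟨q, hq, h1, h2⟩
    · rw [PySem.Dict.getD_modify, if_neg hk]
      simp only [List.mem_cons]
      constructor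
      · rintro (h | ⟨q, hq, h1, h2⟩)
        · exact Or.inl h
        · exact Or.inr ⟨q, Or.inr hq, h1, h2⟩
      · rintro (h | ⟨q, hq | hq, h1, h2⟩)
        · exact Or.inl h
        · subst hq; exact absurd h1.symm hk
        · exact Or.inr ⟨q, hq, h1, h2⟩

-- the grouped index's key list is the days in first-occurrence order
lemma group_keys (l : List (List (String × String))) :
    (l.foldl
        (fun d pedido =>
          d.modify (pedidoGet pedido "dia_da_semana") PySem.Set.empty
            (fun s => PySem.Set.add s (pedidoGet pedido "nome_do_cliente")))
        PySem.Dict.empty).keys =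
      PySem.Set.ofList (l.map (fun p => pedidoGet p "dia_da_semana")) := by
  have h := PySem.Dict.keys_foldl_modify_key l (fun p => pedidoGet p "dia_da_semana")
    PySem.Set.empty (fun _ p s => PySem.Set.add s (pedidoGet p "nome_do_cliente"))
    PySem.Dict.empty
  simpa [PySem.Set.update_nil_left] using h

-- filtering a dict's items by the value, then projecting the keys, equals filtering
-- its (nodup) key list through getD
lemma items_filter_map_fst (nome : String) (l : List (String × PySem.Set String))
    (hn : (l.map (fun kv => kv.1)).Nodup) :
    ((l.filter (fun kv => !(PySem.Set.contains kv.2 nome))).map (fun kv => kv.1)) =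
      (l.map (fun kv => kv.1)).filter
        (fun k => !(PySem.Set.contains ((PySem.Dict.mk l).getD k PySem.Set.empty) nome)) := by
  induction l with
  | nil => simp
  | cons kv rest ih =>
    obtain ⟨k, v⟩ := kv
    simp only [List.map_cons, List.nodup_cons] at hn
    have hk : (PySem.Dict.mk ((k, v) :: rest)).getD k PySem.Set.empty = v := by
      simp [PySem.Dict.getD, PySem.Dict.get?_mk_cons]
    have hrest : ((rest.map (fun kv => kv.1)).filter
        (fun k' => !(PySem.Set.contains
          ((PySem.Dict.mk ((k, v) :: rest)).getD k' PySem.Set.empty) nome))) =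
        ((rest.map (fun kv => kv.1)).filter
          (fun k' => !(PySem.Set.contains
            ((PySem.Dict.mk rest).getD k' PySem.Set.empty) nome))) := by
      refine List.filter_congr (fun k' hk' => ?_)
      have hne : (k == k') = false := by
        simp only [beq_eq_false_iff_ne]; intro h; exact hn.1 (h ▸ hk')
      simp [PySem.Dict.getD, PySem.Dict.get?_mk_cons, hne]
    by_cases hP : (PySem.Set.contains v nome) = true
    · have h1 : ¬((!(PySem.Set.contains v nome)) = true) := by
        simp at hP ⊢; exact hP
      have h2 : ¬((!(PySem.Set.contains
          ((PySem.Dict.mk ((k, v) :: rest)).getD k PySem.Set.empty) nome)) = true) := by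
        rw [hk]; simp at hP ⊢; exact hP
      rw [List.filter_cons, List.map_cons, List.filter_cons, if_neg h1, if_neg h2,
        ih hn.2, hrest]
    · have hP' : PySem.Set.contains v nome = false := by simpa using hP
      have h1 : (!(PySem.Set.contains v nome)) = true := by
        simp at hP' ⊢; exact hP'
      have h2 : (!(PySem.Set.contains
          ((PySem.Dict.mk ((k, v) :: rest)).getD k PySem.Set.empty) nome)) = true := by
        rw [hk]; simp at hP' ⊢; exact hP'
      rw [List.filter_cons, List.map_cons, List.filter_cons, if_pos h1, if_pos h2,
        List.map_cons, ih hn.2, hrest]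

lemma dias_sem_ir_eq (nome_do_cliente : String) (lista_de_pedido : List (List (String × String))) :
    dias_sem_ir nome_do_cliente lista_de_pedido = dias_sem_ir_alt nome_do_cliente lista_de_pedido := by
  unfold dias_sem_ir dias_sem_ir_alt
  set F := lista_de_pedido.foldl
      (fun d pedido =>
        d.modify (pedidoGet pedido "dia_da_semana") PySem.Set.empty
          (fun s => PySem.Set.add s (pedidoGet pedido "nome_do_cliente")))
      PySem.Dict.empty with hF
  set tl := lista_de_pedido.map (fun pedido => pedidoGet pedido "dia_da_semana") with htl
  set fl := (lista_de_pedido.filter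
      (fun pedido => pedidoGet pedido "nome_do_cliente" == nome_do_cliente)).map
    (fun pedido => pedidoGet pedido "dia_da_semana") with hfl
  -- B's side: reduce to a filter of the day list
  have hkeys : F.items.map (fun kv => kv.1) = PySem.Set.ofList tl := group_keys lista_de_pedido
  have hnodup : (F.items.map (fun kv => kv.1)).Nodup := by
    rw [hkeys]; exact PySem.Set.nodup_ofList _
  rw [items_filter_map_fst nome_do_cliente F.items hnodup]
  have hmk : PySem.Dict.mk F.items = F := rfl
  rw [hmk, hkeys]
  -- A's side: the second half of the symmetric difference is empty
  have hsub : ∀ x ∈ PySem.Set.ofList fl, x ∈ PySem.Set.ofList tl := by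
    intro x hx
    rw [PySem.Set.mem_ofList] at hx ⊢
    obtain ⟨p, hp, hxe⟩ := List.mem_map.mp hx
    exact List.mem_map.mpr ⟨p, (List.mem_filter.mp hp).1, hxe⟩
  have hnil : (PySem.Set.ofList fl).filter
      (fun x => !(PySem.Set.contains (PySem.Set.ofList tl) x)) = [] := by
    rw [List.filter_eq_nil_iff]
    intro a ha
    have h2 : a ∈ tl := by
      have := hsub a ha; rwa [PySem.Set.mem_ofList] at this
    simp [h2]
  rw [PySem.Set.symmDiff, PySem.Set.diff, PySem.Set.diff, hnil, List.append_nil]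
  -- both sides now filter the distinct day list; the filtered list is nodup
  rw [PySem.Set.ofList_eq_self_of_nodup _ ((PySem.Set.nodup_ofList tl).filter _)]
  -- the two predicates agree on every day
  refine List.filter_congr (fun k _ => ?_)
  have hb : ∀ a b : Bool, (a = true ↔ b = true) → a = b := by decide
  have : PySem.Set.contains (PySem.Set.ofList fl) k =
      PySem.Set.contains (F.getD k PySem.Set.empty) nome_do_cliente := by
    refine hb _ _ ?_
    rw [PySem.Set.contains_iff, PySem.Set.mem_ofList, hF, group_getD_contains]
    simp only [PySem.Dict.getD_empty, hfl, List.mem_map, List.mem_filter, beq_iff_eq]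
    constructor
    · rintro ⟨p, ⟨hp, hc⟩, hd⟩
      exact Or.inr ⟨p, hp, hd, hc⟩
    · rintro (h | ⟨p, hp, hd, hc⟩)
      · exact absurd h (by simp [PySem.Set.empty])
      · exact ⟨p, ⟨hp, hc⟩, hd⟩
  rw [this]

-- ===== VERDICT (by name: the statement is the Claim_ definition above) =====
theorem dias_sem_ir_spec : Claim_equal_dias_sem_ir := by
  intro nome lista _ _
  exact dias_sem_ir_eq nome lista
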